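-- pv_equiv track=rewrite | github.com/bearbro/Stock_Price_Prediction_Model | 2相关公司挖掘/1关键实体提取/NER_souhu_ccks/model1/ner.py | my_strip
-- ===== SOURCE A (Python) =====
-- def my_strip(_tokens, x):
--     sub = _tokens[x[0]:x[1]]
--     new_sub = sub.strip()
--     if len(new_sub) == 0:
--         return (0, 0)
--     a, b = 0, -1
--     while new_sub[0] != sub[a]:
--         a += 1
--     while new_sub[-1] != sub[b]:
--         b -= 1
--     return (x[0] + a, x[1] + b + 1)
-- ===== SOURCE B (Python) =====
-- def my_strip(_tokens, x):
--     sub = _tokens[x[0]:x[1]]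
--     rs = sub.rstrip()
--     if not rs:
--         return (0, 0)
--     ls = sub.lstrip()
--     return (x[0] + (len(sub) - len(ls)), x[1] - (len(sub) - len(rs)))
-- ===== Notes on version B (the rewrite author's own statement) =====
-- stated objective: simpler
-- what changed: B replaces A's two character-matching while loops (scanning forward from index 0 and backward from index -1 comparing against the stripped string's end characters) with plain length arithmetic over lstrip/rstrip results: start offset = x[0] + (len(sub) - len(lstrip)), end offset = x[1] - (len(sub) - len(rstrip)).
import Mathlib
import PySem

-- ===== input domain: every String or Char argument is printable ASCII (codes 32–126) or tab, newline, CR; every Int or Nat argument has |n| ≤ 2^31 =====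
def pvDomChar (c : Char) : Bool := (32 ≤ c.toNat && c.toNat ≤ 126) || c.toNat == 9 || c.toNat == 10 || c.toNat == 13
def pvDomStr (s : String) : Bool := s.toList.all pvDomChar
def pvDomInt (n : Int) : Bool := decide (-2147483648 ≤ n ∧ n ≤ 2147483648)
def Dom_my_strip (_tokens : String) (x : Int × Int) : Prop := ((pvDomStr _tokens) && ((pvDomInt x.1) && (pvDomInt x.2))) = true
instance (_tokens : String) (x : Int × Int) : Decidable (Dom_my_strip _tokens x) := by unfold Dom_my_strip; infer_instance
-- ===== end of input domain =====

-- B drops A's two index-scanning while loops in favour of length arithmetic on lstrip/rstrip (objective: simpler).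

-- ===== PORT A =====
-- 'while new_sub[0] != sub[a]: a += 1' — scans sub from index 0 upward
def pvFindA (c : Char) : List Char → Int → Int
  | [], a => a
  | h :: t, a => if h == c then a else pvFindA c t (a + 1)

-- 'while new_sub[-1] != sub[b]: b -= 1' — sub[-1], sub[-2], … are sub.reverse[0], sub.reverse[1], …
def pvFindB (c : Char) : List Char → Int → Int
  | [], b => b
  | h :: t, b => if h == c then b else pvFindB c t (b - 1)

def my_strip (_tokens : String) (x : Int × Int) : Int × Int :=
  let sub := PySem.List.slice _tokens.toList (some x.1) (some x.2)
  let new_sub := PySem.Chars.strip sub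
  if h : new_sub = [] then (0, 0)
  else
    let a := pvFindA (new_sub.head h) sub 0
    let b := pvFindB (new_sub.getLast h) sub.reverse (-1)
    (x.1 + a, x.2 + b + 1)

-- ===== PORT B =====
def my_strip_alt (_tokens : String) (x : Int × Int) : Int × Int :=
  let sub := PySem.List.slice _tokens.toList (some x.1) (some x.2)
  let rs := PySem.Chars.rstrip sub
  if rs = [] then (0, 0)
  else
    let ls := PySem.Chars.lstrip sub
    (x.1 + ((sub.length : Int) - (ls.length : Int)),
     x.2 - ((sub.length : Int) - (rs.length : Int)))

-- ===== PRECONDITION & SPEC =====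
def Spec_my_strip (_tokens : String) (x : Int × Int) (out : Int × Int) : Prop := out = my_strip_alt _tokens x
instance (_tokens : String) (x : Int × Int) (out : Int × Int) : Decidable (Spec_my_strip _tokens x out) := by unfold Spec_my_strip; infer_instance

-- ===== CLAIM (what is proved, stated in full; the proofs are below) =====
def Claim_equal_my_strip : Prop := ∀ (_tokens : String) (x : Int × Int), Dom_my_strip _tokens x → Spec_my_strip _tokens x (my_strip _tokens x)

-- ===== LEMMAS AND PROOFS =====

-- A's forward scan stops at the first index whose char equals c; when c is the head of
-- dropWhile isspace l (hence the first non-space char), that index is the leading-space count.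
lemma pvFindA_eq (c : Char) (hc : PySem.Chars.isspace c = false) :
    ∀ (l : List Char) (a : Int), (l.dropWhile PySem.Chars.isspace).head? = some c →
      pvFindA c l a = a + ((l.length : Int) - ((l.dropWhile PySem.Chars.isspace).length : Int)) := by
  intro l
  induction l with
  | nil => intro a h; simp at h
  | cons h t ih =>
    intro a hh
    by_cases hs : PySem.Chars.isspace h = true
    · have hne : (h == c) = false := by
        simp only [beq_eq_false_iff_ne]; rintro rfl; rw [hs] at hc; exact absurd hc (by simp)
      rw [List.dropWhile_cons_of_pos hs] at hh
      have hle : (t.dropWhile PySem.Chars.isspace).length ≤ t.length := by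
        simpa using List.Sublist.length_le (List.dropWhile_sublist (l := t) (p := PySem.Chars.isspace))
      simp only [pvFindA, hne]
      rw [ih _ hh, List.dropWhile_cons_of_pos hs]
      simp only [List.length_cons]
      push_cast
      omega
    · rw [List.dropWhile_cons_of_neg hs] at hh
      simp only [List.head?_cons, Option.some.injEq] at hh
      subst hh
      simp [pvFindA, List.dropWhile_cons_of_neg hs]

lemma pvFindB_eq (c : Char) (hc : PySem.Chars.isspace c = false) :
    ∀ (l : List Char) (b : Int), (l.dropWhile PySem.Chars.isspace).head? = some c →
      pvFindB c l b = b - ((l.length : Int) - ((l.dropWhile PySem.Chars.isspace).length : Int)) := by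
  intro l
  induction l with
  | nil => intro b h; simp at h
  | cons h t ih =>
    intro b hh
    by_cases hs : PySem.Chars.isspace h = true
    · have hne : (h == c) = false := by
        simp only [beq_eq_false_iff_ne]; rintro rfl; rw [hs] at hc; exact absurd hc (by simp)
      rw [List.dropWhile_cons_of_pos hs] at hh
      have hle : (t.dropWhile PySem.Chars.isspace).length ≤ t.length := by
        simpa using List.Sublist.length_le (List.dropWhile_sublist (l := t) (p := PySem.Chars.isspace))
      simp only [pvFindB, hne]
      rw [ih _ hh, List.dropWhile_cons_of_pos hs]
      simp only [List.length_cons]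
      push_cast
      omega
    · rw [List.dropWhile_cons_of_neg hs] at hh
      simp only [List.head?_cons, Option.some.injEq] at hh
      subst hh
      simp [pvFindB, List.dropWhile_cons_of_neg hs]

lemma rstrip_nil_iff (s : List Char) :
    PySem.Chars.rstrip s = [] ↔ ∀ x ∈ s, PySem.Chars.isspace x = true := by
  simp [PySem.Chars.rstrip, List.dropWhile_eq_nil_iff]

lemma strip_nil_iff (s : List Char) :
    PySem.Chars.strip s = [] ↔ ∀ x ∈ s, PySem.Chars.isspace x = true := by
  rw [PySem.Chars.strip, rstrip_nil_iff]
  constructor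
  · intro h x hx
    rw [← List.takeWhile_append_dropWhile (p := PySem.Chars.isspace) (l := s)] at hx
    rcases List.mem_append.1 hx with hx | hx
    · exact List.mem_takeWhile_imp hx
    · exact h x hx
  · intro h x hx
    exact h x ((List.dropWhile_sublist _).mem hx)

lemma head_dropWhile_false (p : Char → Bool) (l : List Char) (c : Char)
    (h : (l.dropWhile p).head? = some c) : p c = false := by
  have := List.head?_dropWhile_not p l
  rw [h] at this; simpa using this

lemma prefix_head? {α : Type} (l₁ l₂ : List α) (h : l₁ <+: l₂) (hne : l₁ ≠ []) :
    l₂.head? = l₁.head? := by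
  rcases h with ⟨t, rfl⟩
  cases l₁ with
  | nil => exact absurd rfl hne
  | cons a l => rfl

-- strip s's first char is the first non-space char of s
lemma strip_head (s : List Char) (h : PySem.Chars.strip s ≠ []) :
    (s.dropWhile PySem.Chars.isspace).head? = (PySem.Chars.strip s).head? := by
  have hpre : PySem.Chars.strip s <+: PySem.Chars.lstrip s := by
    rw [PySem.Chars.strip, PySem.Chars.rstrip]
    have := List.dropWhile_suffix (l := (PySem.Chars.lstrip s).reverse) (p := PySem.Chars.isspace)
    simpa using this.reverse
  rw [PySem.Chars.lstrip] at hpre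
  exact prefix_head? _ _ hpre h

-- strip s's last char is the first non-space char of s.reverse
lemma strip_getLast (s : List Char) (h : PySem.Chars.strip s ≠ []) :
    (s.reverse.dropWhile PySem.Chars.isspace).head? = (PySem.Chars.strip s).getLast? := by
  have hne : (PySem.Chars.lstrip s).reverse.dropWhile PySem.Chars.isspace ≠ [] := by
    intro he
    apply h
    rw [PySem.Chars.strip, PySem.Chars.rstrip, he, List.reverse_nil]
  have hsplit : s.reverse = (s.dropWhile PySem.Chars.isspace).reverse ++ (s.takeWhile PySem.Chars.isspace).reverse := by
    rw [← List.reverse_append, List.takeWhile_append_dropWhile]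
  rw [hsplit, List.dropWhile_append]
  have hne' : (s.dropWhile PySem.Chars.isspace).reverse.dropWhile PySem.Chars.isspace ≠ [] := by
    rw [PySem.Chars.lstrip] at hne; exact hne
  rw [if_neg (by simpa [List.isEmpty_iff] using hne')]
  rw [List.head?_append_of_ne_nil _ hne']
  rw [PySem.Chars.strip, PySem.Chars.rstrip, List.getLast?_reverse, PySem.Chars.lstrip]

-- ===== VERDICT (by name: the statement is the Claim_ definition above) =====
theorem my_strip_spec : Claim_equal_my_strip := by
  intro _tokens x _hdom
  unfold Spec_my_strip my_strip my_strip_alt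
  set sub := PySem.List.slice _tokens.toList (some x.1) (some x.2) with hsub
  by_cases hall : ∀ c ∈ sub, PySem.Chars.isspace c = true
  · rw [dif_pos ((strip_nil_iff sub).2 hall), if_pos ((rstrip_nil_iff sub).2 hall)]
  · have hstrip : PySem.Chars.strip sub ≠ [] := fun he => hall ((strip_nil_iff sub).1 he)
    have hrs : PySem.Chars.rstrip sub ≠ [] := fun he => hall ((rstrip_nil_iff sub).1 he)
    rw [dif_neg hstrip, if_neg hrs]
    -- head side
    have hh : (sub.dropWhile PySem.Chars.isspace).head? = some ((PySem.Chars.strip sub).head hstrip) := by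
      rw [strip_head sub hstrip, List.head?_eq_some_head]
    have hcA := head_dropWhile_false _ _ _ hh
    -- last side
    have hl : (sub.reverse.dropWhile PySem.Chars.isspace).head? = some ((PySem.Chars.strip sub).getLast hstrip) := by
      rw [strip_getLast sub hstrip, List.getLast?_eq_some_getLast]
    have hcB := head_dropWhile_false _ _ _ hl
    rw [pvFindA_eq _ hcA _ _ hh, pvFindB_eq _ hcB _ _ hl]
    have hls : (PySem.Chars.lstrip sub).length = (sub.dropWhile PySem.Chars.isspace).length := rfl
    have hrsl : (PySem.Chars.rstrip sub).length = (sub.reverse.dropWhile PySem.Chars.isspace).length := by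
      rw [PySem.Chars.rstrip, List.length_reverse]
    rw [Prod.mk.injEq]
    constructor
    · rw [hls]; ring
    · rw [hrsl, List.length_reverse]; ring
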